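-- pv_equiv track=rewrite | github.com/miliar/Code_Jam_Webscraper | Solutions_python/Problem_138/1534.py | war
-- ===== SOURCE A (Python) =====
-- def war(array1, array2): #takes in two sorted arrays
-- 	kens_score = 0
-- 	pointer = 0
-- 	for i in range(0, len(array1)):
-- 		for j in range(pointer, len(array2)):
-- 			if array2[j] > array1[i]:
-- 				kens_score += 1
-- 				pointer = j+1
-- 				break
-- 		if pointer == len(array2):
-- 			break
-- 	return len(array1) - kens_score
-- ===== SOURCE B (Python) =====
-- def war(array1, array2):
--     # Precompute suffix maxima of array2; then one amortized pass:
--     # an unbeatable card is skipped in O(1), a beatable one consumes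
--     # enemy cards that are never scanned again.
--     suffmax = []
--     for y in reversed(array2):
--         suffmax.append(y if not suffmax or y > suffmax[-1] else suffmax[-1])
--     suffmax.reverse()
--     m = len(array2)
--     wins = 0
--     p = 0
--     for x in array1:
--         if p < m and suffmax[p] > x:
--             while array2[p] <= x:
--                 p += 1
--             p += 1
--             wins += 1
--     return len(array1) - wins
-- ===== Notes on version B (the rewrite author's own statement) =====
-- stated objective: faster
-- what changed: Replaces A's nested loops (outer over array1, inner re-scanning array2 from a saved pointer) by a precomputed suffix-maximum table of array2 plus one amortized pass: an unbeatable card is rejected in O(1) via the table and each array2 element is scanned at most once, giving O(n+m) instead of A's O(n*m) worst case; exact on all inputs.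
import Mathlib
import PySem

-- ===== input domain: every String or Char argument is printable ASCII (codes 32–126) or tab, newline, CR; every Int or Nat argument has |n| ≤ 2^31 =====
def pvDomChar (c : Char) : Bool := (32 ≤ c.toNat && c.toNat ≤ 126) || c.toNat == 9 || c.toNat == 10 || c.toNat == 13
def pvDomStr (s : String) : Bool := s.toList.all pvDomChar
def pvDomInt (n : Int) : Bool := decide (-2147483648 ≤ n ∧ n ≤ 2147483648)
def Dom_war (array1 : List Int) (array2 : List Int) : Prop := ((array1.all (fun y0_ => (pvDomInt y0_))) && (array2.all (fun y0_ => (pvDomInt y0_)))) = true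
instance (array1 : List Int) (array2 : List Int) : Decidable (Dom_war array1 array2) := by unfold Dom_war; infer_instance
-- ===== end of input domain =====

-- B replaces A's nested re-scanning loops by a suffix-maximum table of array2 plus one
-- amortized pass (objective: alternative algorithm, linear worst case; exact on all inputs).

-- ===== PORT A =====
-- inner `for j in range(pointer, len(array2)): if array2[j] > array1[i]: … break`
-- (returns the j at which the break fires, none if the loop runs out)
def warInner (ys : List Int) (x : Int) (j : Nat) : Option Nat :=
  if j < ys.length then
    if x < ys.getD j 0 then some j else warInner ys x (j + 1)
  else none
termination_by ys.length - j

-- outer `for i in range(0, len(array1))` with state (kens_score, pointer) and the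
-- `if pointer == len(array2): break` check after the inner loop
def warOuter (xs ys : List Int) (i : Nat) (score : Nat) (p : Nat) : Nat :=
  if i < xs.length then
    match warInner ys (xs.getD i 0) p with
    | some j =>
        if j + 1 = ys.length then score + 1
        else warOuter xs ys (i + 1) (score + 1) (j + 1)
    | none =>
        if p = ys.length then score
        else warOuter xs ys (i + 1) score p
  else score
termination_by xs.length - i

def war (array1 : List Int) (array2 : List Int) : Int :=
  (array1.length : Int) - (warOuter array1 array2 0 0 0 : Int)

-- ===== PORT B =====
-- suffix-maximum table: suffmax built right-to-left then reversed in Source B; here the same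
-- right-to-left accumulation as structural recursion (head H, tail = table of the rest)
def smax : List Int → List Int
  | [] => []
  | y :: r =>
      match smax r with
      | [] => [y]
      | s :: t => (if y > s then y else s) :: s :: t

-- `while array2[p] <= x: p += 1` (only entered when a greater element exists)
def skipLe (ys : List Int) (x : Int) (p : Nat) : Nat :=
  if p < ys.length then
    if ys.getD p 0 ≤ x then skipLe ys x (p + 1) else p
  else p
termination_by ys.length - p

-- `for x in array1:` with state (wins, p)
def warAltLoop (ys sm : List Int) : List Int → Nat → Nat → Nat
  | [], wins, _ => wins
  | x :: t, wins, p =>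
      if p < ys.length ∧ x < sm.getD p 0 then
        warAltLoop ys sm t (wins + 1) (skipLe ys x p + 1)
      else
        warAltLoop ys sm t wins p

def war_alt (array1 : List Int) (array2 : List Int) : Int :=
  (array1.length : Int) - (warAltLoop array2 (smax array2) array1 0 0 : Int)

-- ===== PRECONDITION & SPEC =====
def Spec_war (array1 : List Int) (array2 : List Int) (out : Int) : Prop := out = war_alt array1 array2
instance (array1 : List Int) (array2 : List Int) (out : Int) : Decidable (Spec_war array1 array2 out) := by unfold Spec_war; infer_instance

-- ===== CLAIM (what is proved, stated in full; the proofs are below) =====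
def Claim_equal_war : Prop := ∀ (array1 : List Int) (array2 : List Int), Dom_war array1 array2 → Spec_war array1 array2 (war array1 array2)

-- ===== LEMMAS AND PROOFS =====

-- list-level recursion A's loops compute: consume ys up to (and past) the first element > x
def splitFG (x : Int) : List Int → Option (List Int)
  | [] => none
  | y :: r => if x < y then some r else splitFG x r

def Scnt : List Int → List Int → Nat
  | [], _ => 0
  | x :: xs, ys =>
      match splitFG x ys with
      | some rest => 1 + Scnt xs rest
      | none => Scnt xs ys

theorem Scnt_nil (xs : List Int) : Scnt xs [] = 0 := by
  induction xs with
  | nil => rfl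
  | cons x xs ih => simp [Scnt, splitFG, ih]

theorem Scnt_cons_some (x : Int) (xs ys rest : List Int) (h : splitFG x ys = some rest) :
    Scnt (x :: xs) ys = 1 + Scnt xs rest := by
  simp only [Scnt, h]

theorem Scnt_cons_none (x : Int) (xs ys : List Int) (h : splitFG x ys = none) :
    Scnt (x :: xs) ys = Scnt xs ys := by
  simp only [Scnt, h]

theorem warInner_lt (ys : List Int) (x : Int) :
    ∀ (k p j : Nat), ys.length - p ≤ k → warInner ys x p = some j → j < ys.length := by
  intro k
  induction k with
  | zero =>
      intro p j hk h
      rw [warInner, if_neg (show ¬ p < ys.length by omega)] at h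
      exact absurd h (by simp)
  | succ k ih =>
      intro p j hk h
      rw [warInner] at h
      by_cases hp : p < ys.length
      · rw [if_pos hp] at h
        by_cases hx : x < ys.getD p 0
        · rw [if_pos hx] at h
          injection h with h'
          omega
        · rw [if_neg hx] at h
          exact ih (p + 1) j (by omega) h
      · rw [if_neg hp] at h
        exact absurd h (by simp)

theorem warInner_split (ys : List Int) (x : Int) :
    ∀ (k p : Nat), ys.length - p ≤ k →
      splitFG x (ys.drop p) = (warInner ys x p).map (fun j => ys.drop (j + 1)) := by
  intro k
  induction k with
  | zero =>
      intro p hk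
      have hp : ¬ p < ys.length := by omega
      rw [warInner, if_neg hp, List.drop_eq_nil_of_le (by omega)]
      rfl
  | succ k ih =>
      intro p hk
      rw [warInner]
      by_cases hp : p < ys.length
      · rw [if_pos hp, List.drop_eq_getElem_cons hp]
        have hg : ys[p] = ys.getD p 0 := (List.getD_eq_getElem ys 0 hp).symm
        rw [hg]
        by_cases hx : x < ys.getD p 0
        · rw [if_pos hx]
          simp only [splitFG, if_pos hx, Option.map_some]
        · rw [if_neg hx]
          simp only [splitFG, if_neg hx]
          exact ih (p + 1) (by omega)
      · rw [if_neg hp, List.drop_eq_nil_of_le (by omega)]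
        rfl

theorem warOuter_eq (xs ys : List Int) :
    ∀ (k i score p : Nat), xs.length - i ≤ k → p ≤ ys.length →
      warOuter xs ys i score p = score + Scnt (xs.drop i) (ys.drop p) := by
  intro k
  induction k with
  | zero =>
      intro i score p hk hp
      rw [warOuter, if_neg (show ¬ i < xs.length by omega),
        List.drop_eq_nil_of_le (show xs.length ≤ i by omega)]
      simp [Scnt]
  | succ k ih =>
      intro i score p hk hp
      rw [warOuter]
      by_cases hi : i < xs.length
      · rw [if_pos hi]
        have hdx : xs.drop i = xs.getD i 0 :: xs.drop (i + 1) := by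
          rw [List.drop_eq_getElem_cons hi, List.getD_eq_getElem xs 0 hi]
        split
        next j h =>
            have hsplit := warInner_split ys (xs.getD i 0) (ys.length - p) p (le_refl _)
            rw [h, Option.map_some] at hsplit
            have hj : j < ys.length := warInner_lt ys (xs.getD i 0) (ys.length - p) p j (le_refl _) h
            have hS : Scnt (xs.drop i) (ys.drop p) = 1 + Scnt (xs.drop (i + 1)) (ys.drop (j + 1)) := by
              rw [hdx, Scnt_cons_some _ _ _ _ hsplit]
            rw [hS]
            by_cases hend : j + 1 = ys.length
            · rw [if_pos hend, hend, List.drop_length, Scnt_nil]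
            · rw [if_neg hend, ih (i + 1) (score + 1) (j + 1) (by omega) (by omega)]
              omega
        next h =>
            have hsplit := warInner_split ys (xs.getD i 0) (ys.length - p) p (le_refl _)
            rw [h, Option.map_none] at hsplit
            have hS : Scnt (xs.drop i) (ys.drop p) = Scnt (xs.drop (i + 1)) (ys.drop p) := by
              rw [hdx, Scnt_cons_none _ _ _ hsplit]
            rw [hS]
            by_cases hend : p = ys.length
            · rw [if_pos hend, hend, List.drop_length, Scnt_nil]; omega
            · rw [if_neg hend, ih (i + 1) score p (by omega) hp]
      · rw [if_neg hi, List.drop_eq_nil_of_le (show xs.length ≤ i by omega)]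
        simp [Scnt]

-- smax is a congruence for cons: smax (y :: r) = H :: smax r
theorem smax_cons (y : Int) (r : List Int) :
    smax (y :: r) = (match smax r with | [] => y | s :: _ => if y > s then y else s) :: smax r := by
  cases h : smax r with
  | nil => simp [smax, h]
  | cons s t => simp [smax, h]

theorem smax_drop : ∀ (ys : List Int) (p : Nat), smax (ys.drop p) = (smax ys).drop p := by
  intro ys
  induction ys with
  | nil => intro p; simp [smax]
  | cons y r ih =>
      intro p
      cases p with
      | zero => simp
      | succ p =>
          rw [List.drop_succ_cons, smax_cons, List.drop_succ_cons, ih p]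

theorem smax_head_gt_iff (x : Int) :
    ∀ zs : List Int, zs ≠ [] → (x < (smax zs).headD 0 ↔ splitFG x zs ≠ none) := by
  intro zs
  induction zs with
  | nil => intro h; exact absurd rfl h
  | cons z r ih =>
      intro _
      rw [smax_cons]
      cases hr : smax r with
      | nil =>
          have hrnil : r = [] := by
            cases r with
            | nil => rfl
            | cons a b => rw [smax_cons] at hr; exact absurd hr (by simp)
          subst hrnil
          by_cases hx : x < z <;> simp [splitFG, hx]
      | cons s t =>
          have hrne : r ≠ [] := by
            intro hc; subst hc; simp [smax] at hr
          have hih := ih hrne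
          rw [hr] at hih
          simp only [List.headD_cons] at hih ⊢
          by_cases hx : x < z
          · have : x < if z > s then z else s := by split <;> omega
            simp [splitFG, hx, this]
          · have hiff : (x < if z > s then z else s) ↔ x < s := by split <;> omega
            rw [hiff, hih]
            simp [splitFG, hx]

-- the guard of B's branch holds exactly when A's inner scan from p succeeds
theorem guard_iff_warInner (ys : List Int) (x : Int) (p : Nat) (hp : p < ys.length) :
    (x < (smax ys).getD p 0 ↔ warInner ys x p ≠ none) := by
  have h1 : (smax ys).getD p 0 = (smax (ys.drop p)).headD 0 := by
    rw [smax_drop, List.headD_eq_head?_getD, List.head?_drop, List.getD_eq_getElem?_getD]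
  have hne : ys.drop p ≠ [] := by
    intro hc
    have := List.drop_eq_nil_iff.mp hc
    omega
  rw [h1, smax_head_gt_iff x (ys.drop p) hne,
      warInner_split ys x (ys.length - p) p (le_refl _)]
  cases warInner ys x p <;> simp

theorem skipLe_eq (ys : List Int) (x : Int) :
    ∀ (k p j : Nat), ys.length - p ≤ k → warInner ys x p = some j → skipLe ys x p = j := by
  intro k
  induction k with
  | zero =>
      intro p j hk h
      rw [warInner, if_neg (show ¬ p < ys.length by omega)] at h
      exact absurd h (by simp)
  | succ k ih =>
      intro p j hk h
      rw [warInner] at h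
      rw [skipLe]
      by_cases hp : p < ys.length
      · rw [if_pos hp] at h
        rw [if_pos hp]
        by_cases hx : x < ys.getD p 0
        · rw [if_pos hx] at h
          injection h with h'
          rw [if_neg (by omega), h']
        · rw [if_neg hx] at h
          rw [if_pos (by omega)]
          exact ih (p + 1) j (by omega) h
      · rw [if_neg hp] at h
        exact absurd h (by simp)

theorem warAltLoop_eq (ys : List Int) :
    ∀ (xs : List Int) (wins p : Nat), p ≤ ys.length →
      warAltLoop ys (smax ys) xs wins p = wins + Scnt xs (ys.drop p) := by
  intro xs
  induction xs with
  | nil => intro wins p _; simp [warAltLoop, Scnt]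
  | cons x t ih =>
      intro wins p hp
      rw [warAltLoop]
      have hsplit := warInner_split ys x (ys.length - p) p (le_refl _)
      by_cases hc : p < ys.length ∧ x < (smax ys).getD p 0
      · rw [if_pos hc]
        have hne : warInner ys x p ≠ none := (guard_iff_warInner ys x p hc.1).mp hc.2
        cases h : warInner ys x p with
        | none => exact absurd h hne
        | some j =>
            rw [h, Option.map_some] at hsplit
            have hj : j < ys.length := warInner_lt ys x (ys.length - p) p j (le_refl _) h
            rw [skipLe_eq ys x (ys.length - p) p j (le_refl _) h]
            rw [ih (wins + 1) (j + 1) (by omega)]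
            rw [Scnt_cons_some _ _ _ _ hsplit]
            omega
      · rw [if_neg hc]
        by_cases hp2 : p < ys.length
        · have hx : ¬ x < (smax ys).getD p 0 := fun hxx => hc ⟨hp2, hxx⟩
          have hnone : warInner ys x p = none := by
            by_cases hn : warInner ys x p = none
            · exact hn
            · exact absurd ((guard_iff_warInner ys x p hp2).mpr hn) hx
          rw [hnone, Option.map_none] at hsplit
          rw [ih wins p hp, Scnt_cons_none _ _ _ hsplit]
        · have hdp : ys.drop p = [] := List.drop_eq_nil_of_le (by omega)
          rw [ih wins p hp, hdp, Scnt_cons_none x t [] (by simp [splitFG])]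

-- ===== VERDICT (by name: the statement is the Claim_ definition above) =====
theorem war_spec : Claim_equal_war := by
  intro xs ys _
  unfold Spec_war war war_alt
  have hA : warOuter xs ys 0 0 0 = Scnt xs ys := by
    have := warOuter_eq xs ys xs.length 0 0 0 (by omega) (by omega)
    simpa using this
  have hB : warAltLoop ys (smax ys) xs 0 0 = Scnt xs ys := by
    have := warAltLoop_eq ys xs 0 0 (by omega)
    simpa using this
  rw [hA, hB]
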